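-- pv_equiv track=rewrite | github.com/gondsuryaprakash/Python-Tutorial | Data Structure/Array/Arrangement/rearange a[i]=i.py | Reaarrange
-- ===== SOURCE A (Python) =====
-- def Reaarrange(arr):
--     s=set()
--     for i in range(len(arr)):
--         s.add(arr[i])
--     for j in range(len(arr)):
--         if j in s:
--             arr[j]=j
--         else:
--             arr[j]=-1
--
--     return arr
-- ===== SOURCE B (Python) =====
-- def Reaarrange(arr):
--     n = len(arr)
--     vals = sorted({v for v in arr if 0 <= v < n})
--     out = []
--     k = 0
--     for j in range(n):
--         if k < len(vals) and vals[k] == j: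
--             out.append(j)
--             k += 1
--         else:
--             out.append(-1)
--     arr[:] = out
--     return arr
-- ===== Notes on version B (the rewrite author's own statement) =====
-- stated objective: alternative
-- what changed: Replaces A's hash-set membership test per index by sort-then-merge: collect the distinct in-range values, sort them, and build the output in one merge scan of indices against the sorted list.
import Mathlib
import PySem

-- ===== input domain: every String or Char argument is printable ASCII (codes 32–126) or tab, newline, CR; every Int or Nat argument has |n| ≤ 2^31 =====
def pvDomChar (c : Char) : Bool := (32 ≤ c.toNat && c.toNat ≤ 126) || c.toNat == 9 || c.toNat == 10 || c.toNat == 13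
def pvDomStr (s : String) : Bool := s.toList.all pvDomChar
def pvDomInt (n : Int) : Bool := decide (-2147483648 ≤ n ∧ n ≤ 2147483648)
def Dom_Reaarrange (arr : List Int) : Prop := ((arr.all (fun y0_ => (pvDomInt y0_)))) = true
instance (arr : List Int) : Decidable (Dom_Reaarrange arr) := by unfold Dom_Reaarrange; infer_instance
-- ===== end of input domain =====

-- B rebuilds the array by sorting the distinct in-range values and merging them against the
-- index sequence, instead of A's per-index set-membership test (alternative algorithm, same result).
-- Both Pythons mutate arr in place; the equivalence proved here is about the return value.


-- ===== PORT A =====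
def Reaarrange (arr : List Int) : List Int :=
  let s : PySem.Set Int :=
    (PySem.List.pyRange 0 arr.length 1).foldl
      (fun s i => PySem.Set.add s (PySem.List.pyGetD arr i 0)) PySem.Set.empty
  (PySem.List.pyRange 0 arr.length 1).foldl
    (fun a j => PySem.List.pySetD a j (if PySem.Set.contains s j then j else -1)) arr

-- ===== PORT B =====
-- the merge loop: the pointer k into vals is represented by the suffix of vals from k
def mergeB : List Int → List Int → List Int
  | [], _ => []
  | _ :: js, [] => (-1) :: mergeB js []
  | j :: js, v :: vs => if v = j then j :: mergeB js vs else (-1) :: mergeB js (v :: vs)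

def Reaarrange_alt (arr : List Int) : List Int :=
  let n := arr.length
  let vals : List Int :=
    PySem.List.sorted
      (PySem.Set.ofList (arr.filter (fun v => decide (0 ≤ v) && decide (v < (n : Int)))))
      (fun x => x) false
  mergeB (PySem.List.pyRange 0 n 1) vals

-- ===== PRECONDITION & SPEC =====
def Spec_Reaarrange (arr : List Int) (out : List Int) : Prop := out = Reaarrange_alt arr
instance (arr : List Int) (out : List Int) : Decidable (Spec_Reaarrange arr out) := by unfold Spec_Reaarrange; infer_instance

-- ===== CLAIM (what is proved, stated in full; the proofs are below) =====
def Claim_equal_Reaarrange : Prop := ∀ (arr : List Int), Dom_Reaarrange arr → Spec_Reaarrange arr (Reaarrange arr)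

-- ===== LEMMAS AND PROOFS =====

-- A's second loop: setting index j to f j for every j in range(n) yields map f (range n) ++ leftover.
theorem foldl_pySetD_range (f : Int → Int) :
    ∀ (n : Nat) (a : List Int), n ≤ a.length →
      (PySem.List.pyRange 0 n 1).foldl
        (fun a j => PySem.List.pySetD a j (f j)) a
      = (List.range n).map (fun k : Nat => f (k : Int)) ++ a.drop n := by
  intro n
  induction n with
  | zero => intro a _; simp [PySem.List.pyRange_one_eq_nil]
  | succ n ih =>
    intro a hn
    have h1 : ((n : Int) + 1 : Int) = ((n + 1 : Nat) : Int) := by push_cast; ring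
    have hsplit : PySem.List.pyRange 0 ((n + 1 : Nat) : Int) 1
        = PySem.List.pyRange 0 (n : Int) 1 ++ [(n : Int)] := by
      rw [← h1, PySem.List.pyRange_one_succ_right (by exact_mod_cast Nat.zero_le n)]
    rw [hsplit, List.foldl_append]
    rw [ih a (by omega)]
    simp only [List.foldl_cons, List.foldl_nil]
    rw [PySem.List.pySetD_natCast]
    have hlen : ((List.range n).map (fun k : Nat => f (k : Int))).length = n := by simp
    rw [List.range_succ, List.map_append]
    rw [List.set_append_right _ _ (by omega), hlen, Nat.sub_self,
        List.drop_eq_getElem_cons (show n < a.length by omega), List.set_cons_zero]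
    simp

-- B's merge scan: on a strictly increasing list of values all ≥ a, merging against the indices
-- a, a+1, …, b-1 yields exactly the membership picture.
theorem mergeB_spec :
    ∀ (m : Nat) (a : Int) (vals : List Int), vals.Pairwise (· < ·) → (∀ v ∈ vals, a ≤ v) →
      mergeB (PySem.List.pyRange a (a + m) 1) vals
      = (PySem.List.pyRange a (a + m) 1).map (fun j => if j ∈ vals then j else -1) := by
  intro m
  induction m with
  | zero =>
    intro a vals _ _
    rw [PySem.List.pyRange_one_eq_nil (by push_cast; omega)]
    simp [mergeB]
  | succ m ih =>
    intro a vals hp hge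
    have hcons : PySem.List.pyRange a (a + (m + 1 : Nat)) 1
        = a :: PySem.List.pyRange (a + 1) (a + (m + 1 : Nat)) 1 :=
      PySem.List.pyRange_one_cons (by push_cast; omega)
    have heq : a + ((m + 1 : Nat) : Int) = (a + 1) + (m : Nat) := by push_cast; ring
    rw [hcons]
    cases vals with
    | nil =>
      simp only [mergeB, List.map_cons]
      rw [heq, ih (a + 1) [] (by simp) (by simp)]
      simp
    | cons v vs =>
      have hvge : a ≤ v := hge v (List.mem_cons_self ..)
      have hvs_lt : ∀ w ∈ vs, v < w := by
        intro w hw; exact (List.pairwise_cons.mp hp).1 w hw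
      by_cases hva : v = a
      · subst hva
        simp only [mergeB, if_pos rfl, List.map_cons, List.mem_cons, if_pos (Or.inl rfl)]
        rw [heq, ih (v + 1) vs (List.pairwise_cons.mp hp).2
            (fun w hw => by have := hvs_lt w hw; omega)]
        simp only [true_or, if_true]
        congr 1
        apply List.map_congr_left
        intro j hj
        have hjv : v < j := by
          have := (PySem.List.mem_pyRange_one.mp hj).1; omega
        have hne : ¬ (j = v) := by omega
        simp only [List.mem_cons, hne, false_or]
      · have hva' : v ≠ a := hva
        simp only [mergeB, if_neg hva', List.map_cons]
        have hna : a ∉ v :: vs := by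
          intro h
          rcases List.mem_cons.mp h with h | h
          · omega
          · have := hvs_lt a h; omega
        rw [if_neg hna]
        rw [heq, ih (a + 1) (v :: vs) hp
            (fun w hw => by
              rcases List.mem_cons.mp hw with h | h
              · omega
              · have := hvs_lt w h; have := hvge; omega)]

-- ===== VERDICT (by name: the statement is the Claim_ definition above) =====
theorem Reaarrange_spec : Claim_equal_Reaarrange := by
  intro arr _
  unfold Spec_Reaarrange Reaarrange Reaarrange_alt
  dsimp only
  -- A's set is set(arr)
  have hset : (PySem.List.pyRange 0 arr.length 1).foldl
      (fun s i => PySem.Set.add s (PySem.List.pyGetD arr i 0)) PySem.Set.empty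
      = PySem.Set.ofList arr := by
    rw [PySem.List.foldl_pyRange_zero_pyGetD' arr 0 PySem.Set.add PySem.Set.empty]
    rw [PySem.Set.ofList_eq_foldl]
    rfl
  rw [hset]
  -- A's second loop is a map over range n
  rw [foldl_pySetD_range (fun j => if PySem.Set.contains (PySem.Set.ofList arr) j then j else -1)
      arr.length arr (le_refl _)]
  rw [List.drop_length, List.append_nil]
  -- B's merge is the same map
  set vals : List Int :=
    PySem.List.sorted
      (PySem.Set.ofList (arr.filter (fun v => decide (0 ≤ v) && decide (v < (arr.length : Int)))))
      (fun x => x) false with hvals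
  have hpair : vals.Pairwise (· < ·) := PySem.List.sorted_ofList_pairwise_lt _
  have hmemvals : ∀ j : Int, j ∈ vals ↔ (j ∈ arr ∧ 0 ≤ j ∧ j < (arr.length : Int)) := by
    intro j
    rw [hvals, PySem.List.mem_sorted, PySem.Set.mem_ofList, List.mem_filter]
    simp
  have hge : ∀ v ∈ vals, (0 : Int) ≤ v := fun v hv => ((hmemvals v).mp hv).2.1
  have hm := mergeB_spec arr.length 0 vals hpair hge
  rw [zero_add] at hm
  rw [hm]
  -- pointwise over range n
  rw [show PySem.List.pyRange 0 (arr.length : Int) 1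
        = PySem.List.pyRange 0 ((arr.length : Nat) : Int) 1 from rfl,
      PySem.List.pyRange_zero_nat, List.map_map]
  apply List.map_congr_left
  intro k hk
  have hk' : k < arr.length := List.mem_range.mp hk
  simp only [Function.comp]
  have hmem : ((k : Int) ∈ vals) ↔ ((k : Int) ∈ arr) := by
    rw [hmemvals]
    constructor
    · exact fun h => h.1
    · exact fun h => ⟨h, by exact_mod_cast Nat.zero_le k, by exact_mod_cast hk'⟩
  have hc : PySem.Set.contains (PySem.Set.ofList arr) (k : Int) = decide ((k : Int) ∈ arr) := by
    by_cases h : (k : Int) ∈ arr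
    · simp [PySem.Set.contains, (PySem.Set.mem_ofList arr (k : Int)).mpr h, h]
    · have : (k : Int) ∉ PySem.Set.ofList arr := fun hm => h ((PySem.Set.mem_ofList arr (k : Int)).mp hm)
      simp [PySem.Set.contains, this, h]
  by_cases h : (k : Int) ∈ arr
  · rw [if_pos (hmem.mpr h)]
    simp [hc, h]
  · rw [if_neg (fun hx => h (hmem.mp hx))]
    simp [hc, h]
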